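-- pv_equiv track=rewrite | github.com/chris-data-pro/python-algorithm | algorithm/str_num.py | insert_five
-- ===== SOURCE A (Python) =====
-- def insert_five(a):
--     num = str(abs(a))
--     if a >= 0:
--         for i, n in enumerate(num):
--             if int(n) < 5:
--                 return int(num[:i] + '5' + num[i:])
--         return int(num + '5')
--     else:
--         for i, n in enumerate(num):
--             if int(n) > 5:
--                 return -int(num[:i] + '5' + num[i:])
--         return -int(num + '5')
-- ===== SOURCE B (Python) =====
-- def insert_five(a):
--     # Enumerate every insertion position, then reduce: all candidates have equal
--     # length, so lexicographic max/min on the digit strings is the numeric one.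
--     num = str(abs(a))
--     cands = [num[:i] + '5' + num[i:] for i in range(len(num) + 1)]
--     if a >= 0:
--         return int(max(cands))
--     return -int(min(cands))
-- ===== Notes on version B (the rewrite author's own statement) =====
-- stated objective: alternative
-- what changed: Replaces A's greedy early-return scan for the insertion point with an enumerate-all-candidates-then-reduce strategy: build every insertion of the digit five (one candidate per position) and take the maximum candidate string for nonnegative a, minus the parsed minimum for negative a; all candidates have equal length, so string order is numeric order.
import Mathlib
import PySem

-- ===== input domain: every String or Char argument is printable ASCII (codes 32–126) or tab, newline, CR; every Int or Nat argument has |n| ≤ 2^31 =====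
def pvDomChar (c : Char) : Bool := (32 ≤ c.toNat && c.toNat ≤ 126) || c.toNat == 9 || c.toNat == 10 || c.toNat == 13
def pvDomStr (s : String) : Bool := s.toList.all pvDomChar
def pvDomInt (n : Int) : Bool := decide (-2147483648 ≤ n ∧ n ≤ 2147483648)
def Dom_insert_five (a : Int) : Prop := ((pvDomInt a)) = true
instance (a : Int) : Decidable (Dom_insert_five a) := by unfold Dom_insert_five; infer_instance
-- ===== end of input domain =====

-- B replaces A's greedy early-return scan with enumerate-all-insertions-then-reduce
-- (max of the equal-length candidate strings for a ≥ 0, -int(min) for a < 0); alternative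
-- decomposition, same results.

-- ===== PORT A =====
def insertFiveLoopPos (num : List Char) : List (Int × Char) → Int
  | [] => (PySem.Int.ofChars? (num ++ ['5'])).getD 0
  | (i, n) :: rest =>
    if (PySem.Int.ofChars? [n]).getD 0 < 5 then
      (PySem.Int.ofChars? (PySem.List.slice num none (some i) ++ ['5'] ++ PySem.List.slice num (some i) none)).getD 0
    else insertFiveLoopPos num rest

def insertFiveLoopNeg (num : List Char) : List (Int × Char) → Int
  | [] => -(PySem.Int.ofChars? (num ++ ['5'])).getD 0
  | (i, n) :: rest =>
    if (PySem.Int.ofChars? [n]).getD 0 > 5 then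
      -(PySem.Int.ofChars? (PySem.List.slice num none (some i) ++ ['5'] ++ PySem.List.slice num (some i) none)).getD 0
    else insertFiveLoopNeg num rest

def insert_five (a : Int) : Int :=
  let num := PySem.Int.toChars |a|
  if 0 ≤ a then insertFiveLoopPos num (PySem.List.enumerate num)
  else insertFiveLoopNeg num (PySem.List.enumerate num)

-- ===== PORT B =====
def insert_five_alt (a : Int) : Int :=
  let num := PySem.Int.toChars |a|
  let cands := (PySem.List.pyRange 0 (PySem.List.len num + 1)).map
    (fun i => PySem.List.slice num none (some i) ++ ['5'] ++ PySem.List.slice num (some i) none)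
  if 0 ≤ a then (PySem.Int.ofChars? ((PySem.List.max? cands (fun s => s)).getD [])).getD 0
  else -(PySem.Int.ofChars? ((PySem.List.min? cands (fun s => s)).getD [])).getD 0

-- ===== PRECONDITION & SPEC =====
def Spec_insert_five (a : Int) (out : Int) : Prop := out = insert_five_alt a
instance (a : Int) (out : Int) : Decidable (Spec_insert_five a out) := by unfold Spec_insert_five; infer_instance

-- ===== CLAIM (what is proved, stated in full; the proofs are below) =====
def Claim_equal_insert_five : Prop := ∀ (a : Int), Dom_insert_five a → Spec_insert_five a (insert_five a)

-- ===== LEMMAS AND PROOFS =====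

-- the ten decimal digit characters
def pvDigits : List Char := ['0', '1', '2', '3', '4', '5', '6', '7', '8', '9']

-- A's greedy choice, as a recursive function on the digit list (max / nonnegative side)
def pvGMax : List Char → List Char
  | [] => ['5']
  | c :: t => if c < '5' then '5' :: c :: t else c :: pvGMax t

-- A's greedy choice (min / negative side)
def pvGMin : List Char → List Char
  | [] => ['5']
  | c :: t => if '5' < c then '5' :: c :: t else c :: pvGMin t

-- all insertions of '5', structurally
def pvIns : List Char → List (List Char)
  | [] => [['5']]
  | c :: t => ('5' :: c :: t) :: (pvIns t).map (c :: ·)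

-- the fold step of PySem.List.max? / min? with key = id
def pvMStep (acc : Option (List Char)) (x : List Char) : Option (List Char) :=
  match acc with
  | none => some x
  | some m => if m < x then some x else some m

def pvNStep (acc : Option (List Char)) (x : List Char) : Option (List Char) :=
  match acc with
  | none => some x
  | some m => if x < m then some x else some m

lemma pvMax?_eq (xs : List (List Char)) :
    PySem.List.max? xs (fun s => s) = xs.foldl pvMStep none := by
  unfold PySem.List.max?
  congr 1
  funext acc x
  cases acc <;> rfl

lemma pvMin?_eq (xs : List (List Char)) :
    PySem.List.min? xs (fun s => s) = xs.foldl pvNStep none := by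
  unfold PySem.List.min?
  congr 1
  funext acc x
  cases acc <;> rfl

lemma pvDigitChar_mem (n : Nat) (h : n < 10) : Nat.digitChar n ∈ pvDigits := by
  interval_cases n <;> decide

lemma pvToDigitsCore_succ (f n : Nat) (ds : List Char) :
    Nat.toDigitsCore 10 (f + 1) n ds =
      if n / 10 = 0 then (n % 10).digitChar :: ds
      else Nat.toDigitsCore 10 f (n / 10) ((n % 10).digitChar :: ds) := by
  rw [Nat.toDigitsCore]

lemma pvToDigitsCore_mem :
    ∀ (fuel n : Nat) (ds : List Char), (∀ c ∈ ds, c ∈ pvDigits) →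
      ∀ c ∈ Nat.toDigitsCore 10 fuel n ds, c ∈ pvDigits := by
  intro fuel
  induction fuel with
  | zero => intro n ds h; simpa [Nat.toDigitsCore] using h
  | succ f ih =>
    intro n ds h c hc
    rw [pvToDigitsCore_succ] at hc
    have hmem : ∀ d ∈ (n % 10).digitChar :: ds, d ∈ pvDigits := by
      intro d hd
      rcases List.mem_cons.mp hd with rfl | hd
      · exact pvDigitChar_mem _ (Nat.mod_lt _ (by norm_num))
      · exact h d hd
    by_cases h0 : n / 10 = 0
    · rw [if_pos h0] at hc
      exact hmem c hc
    · rw [if_neg h0] at hc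
      exact ih (n / 10) _ hmem c hc

lemma pvToChars_abs_digits (a : Int) : ∀ c ∈ PySem.Int.toChars |a|, c ∈ pvDigits := by
  have h : ¬ (|a| < 0) := not_lt.mpr (abs_nonneg a)
  simp only [PySem.Int.toChars, h, if_neg, not_false_iff]
  exact pvToDigitsCore_mem _ _ [] (by simp)

lemma pvVal_lt_five (c : Char) (h : c ∈ pvDigits) :
    ((PySem.Int.ofChars? [c]).getD 0 < 5) ↔ c < '5' := by
  fin_cases h <;> decide

lemma pvVal_gt_five (c : Char) (h : c ∈ pvDigits) :
    ((PySem.Int.ofChars? [c]).getD 0 > 5) ↔ '5' < c := by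
  fin_cases h <;> decide

-- mapping (c :: ·) commutes with the max?/min? fold
lemma pvFoldl_mstep_map (c : Char) :
    ∀ (L : List (List Char)) (acc : Option (List Char)),
      List.foldl pvMStep (acc.map (c :: ·)) (L.map (c :: ·)) =
        (List.foldl pvMStep acc L).map (c :: ·) := by
  intro L
  induction L with
  | nil => intro acc; simp
  | cons x L ih =>
    intro acc
    have hstep : pvMStep (acc.map (c :: ·)) (c :: x) = (pvMStep acc x).map (c :: ·) := by
      cases acc with
      | none => rfl
      | some m => by_cases h : m < x <;> simp [pvMStep, h]
    simp only [List.map_cons, List.foldl_cons, hstep, ih]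

lemma pvFoldl_nstep_map (c : Char) :
    ∀ (L : List (List Char)) (acc : Option (List Char)),
      List.foldl pvNStep (acc.map (c :: ·)) (L.map (c :: ·)) =
        (List.foldl pvNStep acc L).map (c :: ·) := by
  intro L
  induction L with
  | nil => intro acc; simp
  | cons x L ih =>
    intro acc
    have hstep : pvNStep (acc.map (c :: ·)) (c :: x) = (pvNStep acc x).map (c :: ·) := by
      cases acc with
      | none => rfl
      | some m => by_cases h : x < m <;> simp [pvNStep, h]
    simp only [List.map_cons, List.foldl_cons, hstep, ih]

lemma pvFoldl_mstep_keep :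
    ∀ (L : List (List Char)) (m : List Char), (∀ x ∈ L, ¬ m < x) →
      List.foldl pvMStep (some m) L = some m := by
  intro L
  induction L with
  | nil => intro m _; rfl
  | cons x L ih =>
    intro m h
    have : pvMStep (some m) x = some m := by
      simp only [pvMStep, if_neg (h x (List.mem_cons_self))]
    rw [List.foldl_cons, this]
    exact ih m (fun y hy => h y (List.mem_cons_of_mem _ hy))

lemma pvFoldl_nstep_keep :
    ∀ (L : List (List Char)) (m : List Char), (∀ x ∈ L, ¬ x < m) →
      List.foldl pvNStep (some m) L = some m := by
  intro L
  induction L with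
  | nil => intro m _; rfl
  | cons x L ih =>
    intro m h
    have : pvNStep (some m) x = some m := by
      simp only [pvNStep, if_neg (h x (List.mem_cons_self))]
    rw [List.foldl_cons, this]
    exact ih m (fun y hy => h y (List.mem_cons_of_mem _ hy))

lemma pvIns_head : ∀ t : List Char, ∃ rest, pvIns t = ('5' :: t) :: rest := by
  intro t
  cases t with
  | nil => exact ⟨[], rfl⟩
  | cons c u => exact ⟨(pvIns u).map (c :: ·), rfl⟩

-- the fold underlying max? selects exactly A's greedy insertion
lemma pvMaxIns : ∀ ds : List Char, (pvIns ds).foldl pvMStep none = some (pvGMax ds) := by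
  intro ds
  induction ds with
  | nil => rfl
  | cons c t ih =>
    simp only [pvIns, List.foldl_cons]
    have hacc : pvMStep none ('5' :: c :: t) = some ('5' :: c :: t) := rfl
    rw [hacc]
    rcases lt_trichotomy c '5' with hlt | heq | hgt
    · -- insert now: '5'::c::t beats every c::x
      have hkeep : ∀ x ∈ (pvIns t).map (c :: ·), ¬ ('5' :: c :: t) < x := by
        intro x hx
        rcases List.mem_map.mp hx with ⟨y, -, rfl⟩
        intro h
        rcases List.cons_lt_cons_iff.mp h with h | ⟨h, -⟩
        · exact absurd h (lt_asymm hlt)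
        · exact absurd h (ne_of_gt hlt)
      rw [pvFoldl_mstep_keep _ _ hkeep, pvGMax, if_pos hlt]
    · -- c = '5': the first mapped candidate ties with the accumulator
      subst heq
      obtain ⟨rest, hins⟩ := pvIns_head t
      rw [hins]
      simp only [List.map_cons, List.foldl_cons]
      have h1 : pvMStep (some ('5' :: '5' :: t)) ('5' :: '5' :: t) = some ('5' :: '5' :: t) := by
        simp [pvMStep]
      rw [h1]
      have h2 := pvFoldl_mstep_map '5' rest (some ('5' :: t))
      simp only [Option.map_some] at h2
      rw [h2]
      have h3 : List.foldl pvMStep (some ('5' :: t)) rest = some (pvGMax t) := by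
        have := ih
        rw [hins] at this
        simpa using this
      rw [h3, pvGMax, if_neg (lt_irrefl '5')]
      rfl
    · -- '5' < c: the first mapped candidate beats the accumulator
      obtain ⟨rest, hins⟩ := pvIns_head t
      rw [hins]
      simp only [List.map_cons, List.foldl_cons]
      have h1 : pvMStep (some ('5' :: c :: t)) (c :: '5' :: t) = some (c :: '5' :: t) := by
        simp only [pvMStep]
        rw [if_pos (List.cons_lt_cons_iff.mpr (Or.inl hgt))]
      rw [h1]
      have h2 := pvFoldl_mstep_map c rest (some ('5' :: t))
      simp only [Option.map_some] at h2
      rw [h2]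
      have h3 : List.foldl pvMStep (some ('5' :: t)) rest = some (pvGMax t) := by
        have := ih
        rw [hins] at this
        simpa using this
      rw [h3, pvGMax, if_neg (not_lt.mpr (le_of_lt hgt))]
      rfl

lemma pvMinIns : ∀ ds : List Char, (pvIns ds).foldl pvNStep none = some (pvGMin ds) := by
  intro ds
  induction ds with
  | nil => rfl
  | cons c t ih =>
    simp only [pvIns, List.foldl_cons]
    have hacc : pvNStep none ('5' :: c :: t) = some ('5' :: c :: t) := rfl
    rw [hacc]
    rcases lt_trichotomy '5' c with hgt | heq | hlt
    · have hkeep : ∀ x ∈ (pvIns t).map (c :: ·), ¬ x < ('5' :: c :: t) := by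
        intro x hx
        rcases List.mem_map.mp hx with ⟨y, -, rfl⟩
        intro h
        rcases List.cons_lt_cons_iff.mp h with h | ⟨h, -⟩
        · exact absurd h (lt_asymm hgt)
        · exact absurd h (ne_of_gt hgt)
      rw [pvFoldl_nstep_keep _ _ hkeep, pvGMin, if_pos hgt]
    · subst heq
      obtain ⟨rest, hins⟩ := pvIns_head t
      rw [hins]
      simp only [List.map_cons, List.foldl_cons]
      have h1 : pvNStep (some ('5' :: '5' :: t)) ('5' :: '5' :: t) = some ('5' :: '5' :: t) := by
        simp [pvNStep]
      rw [h1]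
      have h2 := pvFoldl_nstep_map '5' rest (some ('5' :: t))
      simp only [Option.map_some] at h2
      rw [h2]
      have h3 : List.foldl pvNStep (some ('5' :: t)) rest = some (pvGMin t) := by
        have := ih
        rw [hins] at this
        simpa using this
      rw [h3, pvGMin, if_neg (lt_irrefl '5')]
      rfl
    · obtain ⟨rest, hins⟩ := pvIns_head t
      rw [hins]
      simp only [List.map_cons, List.foldl_cons]
      have h1 : pvNStep (some ('5' :: c :: t)) (c :: '5' :: t) = some (c :: '5' :: t) := by
        simp only [pvNStep]
        rw [if_pos (List.cons_lt_cons_iff.mpr (Or.inl hlt))]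
      rw [h1]
      have h2 := pvFoldl_nstep_map c rest (some ('5' :: t))
      simp only [Option.map_some] at h2
      rw [h2]
      have h3 : List.foldl pvNStep (some ('5' :: t)) rest = some (pvGMin t) := by
        have := ih
        rw [hins] at this
        simpa using this
      rw [h3, pvGMin, if_neg (not_lt.mpr (le_of_lt hlt))]
      rfl

-- A's positive loop computes the parse of the greedy insertion
lemma pvLoopPos_eq :
    ∀ (suf pre : List Char), (∀ c ∈ suf, c ∈ pvDigits) →
      insertFiveLoopPos (pre ++ suf) (PySem.List.enumerate suf (pre.length : Int)) =
        (PySem.Int.ofChars? (pre ++ pvGMax suf)).getD 0 := by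
  intro suf
  induction suf with
  | nil => intro pre _; simp [PySem.List.enumerate_nil, insertFiveLoopPos, pvGMax]
  | cons c rest ih =>
    intro pre hd
    have hc : c ∈ pvDigits := hd c List.mem_cons_self
    rw [PySem.List.enumerate_cons]
    rw [insertFiveLoopPos]
    by_cases h5 : c < '5'
    · rw [if_pos ((pvVal_lt_five c hc).mpr h5)]
      rw [PySem.List.slice_to_natCast, PySem.List.slice_from_natCast,
        List.take_left, List.drop_left]
      rw [pvGMax, if_pos h5]
      simp
    · rw [if_neg (fun h => h5 ((pvVal_lt_five c hc).mp h))]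
      have hcast : (pre.length : Int) + 1 = ((pre ++ [c]).length : Int) := by
        simp [List.length_append]
      have happ : pre ++ c :: rest = (pre ++ [c]) ++ rest := by simp
      rw [hcast, happ, ih (pre ++ [c]) (fun d hdm => hd d (List.mem_cons_of_mem _ hdm))]
      rw [pvGMax, if_neg h5]
      simp

lemma pvLoopNeg_eq :
    ∀ (suf pre : List Char), (∀ c ∈ suf, c ∈ pvDigits) →
      insertFiveLoopNeg (pre ++ suf) (PySem.List.enumerate suf (pre.length : Int)) =
        -(PySem.Int.ofChars? (pre ++ pvGMin suf)).getD 0 := by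
  intro suf
  induction suf with
  | nil => intro pre _; simp [PySem.List.enumerate_nil, insertFiveLoopNeg, pvGMin]
  | cons c rest ih =>
    intro pre hd
    have hc : c ∈ pvDigits := hd c List.mem_cons_self
    rw [PySem.List.enumerate_cons]
    rw [insertFiveLoopNeg]
    by_cases h5 : '5' < c
    · rw [if_pos ((pvVal_gt_five c hc).mpr h5)]
      rw [PySem.List.slice_to_natCast, PySem.List.slice_from_natCast,
        List.take_left, List.drop_left]
      rw [pvGMin, if_pos h5]
      simp
    · rw [if_neg (fun h => h5 ((pvVal_gt_five c hc).mp h))]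
      have hcast : (pre.length : Int) + 1 = ((pre ++ [c]).length : Int) := by
        simp [List.length_append]
      have happ : pre ++ c :: rest = (pre ++ [c]) ++ rest := by simp
      rw [hcast, happ, ih (pre ++ [c]) (fun d hdm => hd d (List.mem_cons_of_mem _ hdm))]
      rw [pvGMin, if_neg h5]
      simp

-- B's candidate comprehension is exactly pvIns
lemma pvIns_eq_range : ∀ ds : List Char,
    (List.range (ds.length + 1)).map (fun k => ds.take k ++ ['5'] ++ ds.drop k) = pvIns ds := by
  intro ds
  induction ds with
  | nil => rfl
  | cons c t ih =>
    rw [List.range_succ_eq_map]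
    simp only [List.map_cons, List.map_map, List.take_zero, List.drop_zero, List.nil_append]
    rw [pvIns]
    congr 1
    rw [← ih, List.map_map]
    apply List.map_congr_left
    intro k _
    simp [Nat.succ_eq_add_one, List.take_succ_cons, List.drop_succ_cons]

lemma pvCands_eq (num : List Char) :
    (PySem.List.pyRange 0 (PySem.List.len num + 1)).map
        (fun i => PySem.List.slice num none (some i) ++ ['5'] ++ PySem.List.slice num (some i) none)
      = pvIns num := by
  have hlen : PySem.List.len num + 1 = ((num.length + 1 : Nat) : Int) := by
    simp [PySem.List.len_eq]
  rw [hlen, PySem.List.pyRange_zero_natCast, List.map_map]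
  rw [← pvIns_eq_range num]
  apply List.map_congr_left
  intro k _
  simp [PySem.List.slice_to_natCast, PySem.List.slice_from_natCast]

lemma pvMain (a : Int) : insert_five a = insert_five_alt a := by
  unfold insert_five insert_five_alt
  simp only []
  have hdig := pvToChars_abs_digits a
  set num := PySem.Int.toChars |a| with hnum
  have hloopPos : insertFiveLoopPos num (PySem.List.enumerate num) =
      (PySem.Int.ofChars? (pvGMax num)).getD 0 := by
    have := pvLoopPos_eq num [] hdig
    simpa using this
  have hloopNeg : insertFiveLoopNeg num (PySem.List.enumerate num) =
      -(PySem.Int.ofChars? (pvGMin num)).getD 0 := by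
    have := pvLoopNeg_eq num [] hdig
    simpa using this
  have hmax : PySem.List.max? ((PySem.List.pyRange 0 (PySem.List.len num + 1)).map
      (fun i => PySem.List.slice num none (some i) ++ ['5'] ++ PySem.List.slice num (some i) none))
      (fun s => s) = some (pvGMax num) := by
    rw [pvCands_eq, pvMax?_eq, pvMaxIns]
  have hmin : PySem.List.min? ((PySem.List.pyRange 0 (PySem.List.len num + 1)).map
      (fun i => PySem.List.slice num none (some i) ++ ['5'] ++ PySem.List.slice num (some i) none))
      (fun s => s) = some (pvGMin num) := by
    rw [pvCands_eq, pvMin?_eq, pvMinIns]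
  by_cases ha : 0 ≤ a
  · rw [if_pos ha, if_pos ha, hloopPos, hmax]
    rfl
  · rw [if_neg ha, if_neg ha, hloopNeg, hmin]
    rfl

-- ===== VERDICT (by name: the statement is the Claim_ definition above) =====
theorem insert_five_spec : Claim_equal_insert_five := by
  intro a _
  unfold Spec_insert_five
  exact pvMain a
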